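-- pv_equiv track=rewrite | github.com/aerovfx/Fullstack4kid | TOPIC_PYTHON/TOPIC_PYTHONBASIC/LUYENTHITHIHSGIOI_THCS/de10/de_10_v1.py | count_unsupplied_locations
-- ===== SOURCE A (Python) =====
-- def count_unsupplied_locations(n, data):
--     data.sort(key=lambda x: x[0])  # Sắp xếp dữ liệu theo vị trí x_i
--
--     max_position = 0  # Vị trí cung cấp khẩu trang cuối cùng
--     count = 0  # Số điểm chưa được cung cấp khẩu trang
--
--     for i in range(n):
--         position, radius = data[i]
--
--         if position > max_position:
--             count += position - max_position - 1
--             max_position = position + radius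
--         elif position + radius > max_position:
--             max_position = position + radius
--
--     return count
-- ===== SOURCE B (Python) =====
-- def count_unsupplied_locations(n, data):
--     data.sort(key=lambda x: x[0])
--     # pass 1: merge the first n points into maximal covered segments,
--     # seeded with a sentinel segment ending at 0 (the initial frontier)
--     segs = [(0, 0)]
--     for position, radius in data[:max(n, 0)]:
--         start, end = segs[-1]
--         if position <= end:
--             segs[-1] = (start, max(end, position + radius))
--         else:
--             segs.append((position, position + radius))
--     # pass 2: sum the gaps between consecutive segments
--     return sum(s - e - 1 for (_, e), (s, _) in zip(segs, segs[1:]))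
-- ===== Notes on version B (the rewrite author's own statement) =====
-- stated objective: alternative
-- what changed: Replaces A's single fused scan carrying (max_position, count) with a two-pass decomposition: a first pass merges the first n sorted points into a list of covered segments (seeded with a sentinel ending at 0), and a second pass sums the gaps between consecutive segments.
import Mathlib
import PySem

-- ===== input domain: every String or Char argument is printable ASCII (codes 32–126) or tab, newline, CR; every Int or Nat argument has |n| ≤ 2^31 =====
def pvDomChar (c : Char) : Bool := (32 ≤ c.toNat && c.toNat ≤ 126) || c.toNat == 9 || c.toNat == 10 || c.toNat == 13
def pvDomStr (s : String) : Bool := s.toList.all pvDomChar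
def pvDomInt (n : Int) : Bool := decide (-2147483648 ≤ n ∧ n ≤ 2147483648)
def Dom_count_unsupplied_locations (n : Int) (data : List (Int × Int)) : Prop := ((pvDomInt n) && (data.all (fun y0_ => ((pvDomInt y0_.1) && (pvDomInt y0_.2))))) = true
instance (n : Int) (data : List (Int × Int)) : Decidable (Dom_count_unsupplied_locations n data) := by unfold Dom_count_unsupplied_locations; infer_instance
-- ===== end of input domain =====

-- B builds the merged covered segments in a first pass and sums the inter-segment
-- gaps in a second pass, instead of A's single fused max/count scan (objective:
-- alternative decomposition). Both A and B sort `data` in place; the claim is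
-- about the return value (B performs the same sort mutation).

-- ===== PORT A =====
-- loop body of A: state (max_position, count), one data point (position, radius)
def pvStepA (s : Int × Int) (pr : Int × Int) : Int × Int :=
  if pr.1 > s.1 then (pr.1 + pr.2, s.2 + (pr.1 - s.1 - 1))
  else if pr.1 + pr.2 > s.1 then (pr.1 + pr.2, s.2)
  else s

def count_unsupplied_locations (n : Int) (data : List (Int × Int)) : Int :=
  let d := PySem.List.sorted data (fun x => x.1)
  let st := (PySem.List.pyRange 0 n 1).foldl
      (fun (s : Int × Int) i => pvStepA s (PySem.List.pyGetD d i (0, 0))) (0, 0)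
  st.2

-- ===== PORT B =====
-- pass-1 body of B: merge the point into the last segment or append a new one
def pvSegStep (segs : List (Int × Int)) (pr : Int × Int) : List (Int × Int) :=
  match segs.getLast? with
  | some se =>
      if pr.1 ≤ se.2 then segs.dropLast ++ [(se.1, max se.2 (pr.1 + pr.2))]
      else segs ++ [(pr.1, pr.1 + pr.2)]
  | none => segs  -- unreachable: segs starts at [(0,0)] and never shrinks

-- pass-2 of B: sum over zip(segs, segs[1:]) of next.start - prev.end - 1
def pvGapSum (segs : List (Int × Int)) : Int :=
  ((segs.zip segs.tail).map (fun p => p.2.1 - p.1.2 - 1)).sum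

def count_unsupplied_locations_alt (n : Int) (data : List (Int × Int)) : Int :=
  let d := PySem.List.sorted data (fun x => x.1)
  let segs := (PySem.List.slice d none (some (max n 0))).foldl pvSegStep [(0, 0)]
  pvGapSum segs

-- ===== PRECONDITION & SPEC =====
-- A indexes data[i] for i in range(n): it raises IndexError iff n > len(data).
def Pre_count_unsupplied_locations (n : Int) (data : List (Int × Int)) : Prop :=
  n ≤ (data.length : Int)
instance (n : Int) (data : List (Int × Int)) : Decidable (Pre_count_unsupplied_locations n data) := by unfold Pre_count_unsupplied_locations; infer_instance

def pvWitness_count_unsupplied_locations : Int × (List (Int × Int)) := (3, [(5, 2), (1, 1), (9, 0)])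

def Spec_count_unsupplied_locations (n : Int) (data : List (Int × Int)) (out : Int) : Prop := out = count_unsupplied_locations_alt n data
instance (n : Int) (data : List (Int × Int)) (out : Int) : Decidable (Spec_count_unsupplied_locations n data out) := by unfold Spec_count_unsupplied_locations; infer_instance

-- ===== CLAIM (what is proved, stated in full; the proofs are below) =====
def Claim_equal_count_unsupplied_locations : Prop := ∀ (n : Int) (data : List (Int × Int)), Dom_count_unsupplied_locations n data → Pre_count_unsupplied_locations n data → Spec_count_unsupplied_locations n data (count_unsupplied_locations n data)

-- ===== LEMMAS AND PROOFS =====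

theorem pvGapSum_cons_cons (x y : Int × Int) (t : List (Int × Int)) :
    pvGapSum (x :: y :: t) = (y.1 - x.2 - 1) + pvGapSum (y :: t) := by
  simp [pvGapSum]

theorem pvGapSum_append_singleton (xs : List (Int × Int)) (y se : Int × Int)
    (h : xs.getLast? = some se) :
    pvGapSum (xs ++ [y]) = pvGapSum xs + (y.1 - se.2 - 1) := by
  induction xs with
  | nil => simp at h
  | cons a t ih =>
    cases t with
    | nil =>
      simp at h
      subst h
      simp [pvGapSum]
    | cons b t' =>
      have hb := ih (by simpa [List.getLast?_cons_cons] using h)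
      simp only [List.cons_append] at hb ⊢
      rw [pvGapSum_cons_cons a b (t' ++ [y]), pvGapSum_cons_cons a b t', hb]
      ring

-- replacing only the END of the last segment leaves the gap sum unchanged
theorem pvGapSum_set_last_end (xs : List (Int × Int)) (s e e' : Int) :
    pvGapSum (xs ++ [(s, e')]) = pvGapSum (xs ++ [(s, e)]) := by
  cases hx : xs.getLast? with
  | none =>
    have : xs = [] := List.getLast?_eq_none_iff.mp hx
    subst this
    simp [pvGapSum]
  | some se =>
    rw [pvGapSum_append_singleton xs _ se hx, pvGapSum_append_singleton xs _ se hx]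

-- invariant: B's segment list tracks A's (max_position, count) state
theorem pvInvariant (l : List (Int × Int)) :
    ∀ (segs : List (Int × Int)) (st : Int × Int) (se : Int × Int),
    segs.getLast? = some se → se.2 = st.1 → pvGapSum segs = st.2 →
    ∃ se', (l.foldl pvSegStep segs).getLast? = some se' ∧
      se'.2 = (l.foldl pvStepA st).1 ∧
      pvGapSum (l.foldl pvSegStep segs) = (l.foldl pvStepA st).2 := by
  induction l with
  | nil => intro segs st se h h1 h2; exact ⟨se, h, h1, h2⟩
  | cons pr rest ih =>
    intro segs st se hlast h1 h2
    simp only [List.foldl_cons]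
    have hne : segs ≠ [] := by
      intro hnil; subst hnil; simp at hlast
    have hdrop : segs = segs.dropLast ++ [se] := by
      have hgl : segs.getLast hne = se := by
        have := List.getLast?_eq_some_getLast hne
        rw [this] at hlast
        exact Option.some.inj hlast
      rw [← hgl]
      exact (List.dropLast_append_getLast hne).symm
    by_cases hle : pr.1 ≤ se.2
    · -- merge into the last segment; A does not count
      have hseg : pvSegStep segs pr = segs.dropLast ++ [(se.1, max se.2 (pr.1 + pr.2))] := by
        rw [pvSegStep, hlast]
        simp [hle]
      have hstA : pvStepA st pr = (max st.1 (pr.1 + pr.2), st.2) := by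
        have hle' : pr.1 ≤ st.1 := h1 ▸ hle
        unfold pvStepA
        split_ifs with c1 c2 <;> simp [Prod.ext_iff] <;> omega
      apply ih _ _ ((se.1, max se.2 (pr.1 + pr.2)))
      · rw [hseg]
        exact List.getLast?_concat
      · rw [hstA, h1]
      · rw [hseg, hstA]
        calc pvGapSum (segs.dropLast ++ [(se.1, max se.2 (pr.1 + pr.2))])
            = pvGapSum (segs.dropLast ++ [(se.1, se.2)]) := pvGapSum_set_last_end _ _ _ _
          _ = pvGapSum segs := by rw [← hdrop]
          _ = st.2 := h2
    · -- new segment; A counts the gap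
      have hseg : pvSegStep segs pr = segs ++ [(pr.1, pr.1 + pr.2)] := by
        rw [pvSegStep, hlast]
        simp [hle]
      have hstA : pvStepA st pr = (pr.1 + pr.2, st.2 + (pr.1 - st.1 - 1)) := by
        have hgt : pr.1 > st.1 := by omega
        unfold pvStepA
        rw [if_pos hgt]
      apply ih _ _ (pr.1, pr.1 + pr.2)
      · rw [hseg]
        exact List.getLast?_concat
      · rw [hstA]
      · rw [hseg, hstA, pvGapSum_append_singleton segs _ se hlast, h1, h2]

-- A's indexed loop over range(n) is the fold over the first n sorted points
theorem pvLoopA_eq_take (d : List (Int × Int)) (n : Int) (h0 : 0 ≤ n)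
    (hn : n ≤ (d.length : Int)) :
    (PySem.List.pyRange 0 n 1).foldl
        (fun (s : Int × Int) i => pvStepA s (PySem.List.pyGetD d i (0, 0))) (0, 0)
      = (d.take n.toNat).foldl pvStepA (0, 0) := by
  have hlen : ((d.take n.toNat).length : Int) = n := by
    simp [List.length_take]
    omega
  have hcong : (PySem.List.pyRange 0 n 1).foldl
        (fun (s : Int × Int) i => pvStepA s (PySem.List.pyGetD d i (0, 0))) (0, 0)
      = (PySem.List.pyRange 0 ((d.take n.toNat).length : Int) 1).foldl
        (fun (s : Int × Int) i => pvStepA s (PySem.List.pyGetD (d.take n.toNat) i (0, 0))) (0, 0) := by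
    rw [hlen]
    apply PySem.List.foldl_congr_mem
    intro acc i hi
    have hi' := (PySem.List.mem_pyRange_one).1 hi
    have h1 : PySem.List.pyGetD d i (0, 0) = d[i.toNat] := by
      apply PySem.List.pyGetD_eq_getElem
      · omega
      · omega
    have h2 : PySem.List.pyGetD (d.take n.toNat) i (0, 0) = (d.take n.toNat)[i.toNat] := by
      apply PySem.List.pyGetD_eq_getElem
      · omega
      · simp [List.length_take]; omega
    rw [h1, h2]
    congr 1
    simp [List.getElem_take]
  rw [hcong]
  exact PySem.List.foldl_pyRange_zero_pyGetD' (d.take n.toNat) (0,0) pvStepA (0,0)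

-- ===== VERDICT (by name: the statement is the Claim_ definition above) =====
theorem count_unsupplied_locations_spec : Claim_equal_count_unsupplied_locations := by
  intro n data _hdom hpre
  unfold Spec_count_unsupplied_locations count_unsupplied_locations count_unsupplied_locations_alt
  dsimp only
  set d := PySem.List.sorted data (fun x => x.1) with hd
  have hdl : (d.length : Int) = (data.length : Int) := by
    simp [hd, PySem.List.length_sorted]
  by_cases hn : n ≤ 0
  · rw [PySem.List.pyRange_one_eq_nil (by omega)]
    have hm : max n 0 = 0 := by omega
    rw [hm, PySem.List.slice_to d (show (0:Int) ≤ 0 by norm_num)]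
    simp [pvGapSum]
  · have hn' : 0 < n := by omega
    have hm : max n 0 = n := by omega
    rw [hm, PySem.List.slice_to d (show (0:Int) ≤ n by omega)]
    rw [pvLoopA_eq_take d n (by omega) (by rw [hdl]; exact hpre)]
    obtain ⟨se', _, _, hg⟩ := pvInvariant (d.take n.toNat) [(0, 0)] (0, 0) (0, 0)
      (by simp) (by simp) (by simp [pvGapSum])
    exact hg.symm
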